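-- pv_equiv track=rewrite | github.com/tgelsema/farseer | informationdialogue/interpret/intrprt_iota.py | getclashes
-- ===== SOURCE A (Python) =====
-- def getclashes(cluedict):
--     """Collect a dictionary of clashes from the dictionary cluedict. A clash
--     is a number c (which is an index for keywordlist) that occurs in both the
--     list cluedict[k] and in the list cluedict[l] (with k != l). In such a case,
--     getclashes() returns a dictionary clashes with clashes[c] = [k, l].
--     """
--     clashes = {} # stores for each clash the list of keys in cluedict responsible for the clash
--     for k in cluedict.keys():
--         i = 0
--         while i < len(cluedict[k]):
--             for l in cluedict.keys():
--                 if l != k and cluedict[k][i] in cluedict[l]: # clash discovered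
--                     if cluedict[k][i] not in clashes.keys():
--                         clashes[cluedict[k][i]] = [k]
--                     else:
--                         clashes[cluedict[k][i]].append(k)
--             i += 1
--     return clashes
-- ===== SOURCE B (Python) =====
-- def getclashes(cluedict):
--     # one pass: count, for every value, how many keys' lists contain it;
--     # then rebuild clashes by appending k (count-1) times per occurrence.
--     keys_with = {}
--     for vals in cluedict.values():
--         for v in set(vals):
--             keys_with[v] = keys_with.get(v, 0) + 1
--     clashes = {}
--     for k, vals in cluedict.items():
--         for v in vals:
--             m = keys_with[v] - 1
--             if m > 0:
--                 clashes.setdefault(v, []).extend([k] * m)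
--     return clashes
-- ===== Notes on version B (the rewrite author's own statement) =====
-- stated objective: faster
-- what changed: A rescans every other key's list for every occurrence of every value (and rescans clashes.keys()); B makes one pass building a value->number-of-keys-containing-it counter, then one pass appending k (count-1) times per occurrence, removing all inner scans; intended as faster, measured ~6x at n=1024 (both limited by the output's size on duplicate-heavy inputs).
import Mathlib
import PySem

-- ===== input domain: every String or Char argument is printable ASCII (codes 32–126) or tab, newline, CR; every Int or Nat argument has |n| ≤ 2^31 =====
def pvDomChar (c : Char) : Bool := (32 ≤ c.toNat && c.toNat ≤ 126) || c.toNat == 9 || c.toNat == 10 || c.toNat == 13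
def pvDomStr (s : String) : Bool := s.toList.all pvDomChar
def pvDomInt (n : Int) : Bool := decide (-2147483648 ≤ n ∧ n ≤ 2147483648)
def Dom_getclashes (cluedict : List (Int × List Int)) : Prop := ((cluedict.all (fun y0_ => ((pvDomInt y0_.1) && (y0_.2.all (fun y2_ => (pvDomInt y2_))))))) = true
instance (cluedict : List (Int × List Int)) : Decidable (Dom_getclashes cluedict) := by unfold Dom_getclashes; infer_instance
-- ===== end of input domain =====

-- B replaces A's quadruple rescanning loops by a one-pass value→key-count index, then rebuilds each
-- clash list by appending (count−1) copies at once; intended as faster (measured ~6× at n=1024).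

-- ===== PORT A =====
def getclashes (cluedict : List (Int × List Int)) : List (Int × List Int) :=
  let d := PySem.Dict.ofList cluedict
  let ks := PySem.Dict.keys d
  let clashes :=
    ks.foldl (fun clashes k =>
      -- while i < len(cluedict[k]): the list is not mutated, so this is a pass over its elements
      (PySem.Dict.getD d k []).foldl (fun clashes v =>
        ks.foldl (fun clashes l =>
          if l ≠ k ∧ v ∈ PySem.Dict.getD d l [] then
            if ¬ (PySem.Dict.contains clashes v = true) then
              PySem.Dict.insert clashes v [k]
            else
              PySem.Dict.modify clashes v [] (fun xs => xs ++ [k])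
          else clashes) clashes) clashes) (PySem.Dict.empty : PySem.Dict Int (List Int))
  PySem.Dict.items clashes

-- ===== PORT B =====
def getclashes_alt (cluedict : List (Int × List Int)) : List (Int × List Int) :=
  let d := PySem.Dict.ofList cluedict
  let keysWith :=
    (PySem.Dict.values d).foldl (fun c vals =>
      (PySem.Set.ofList vals).foldl (fun c v => PySem.Dict.modify c v 0 (fun n => n + 1)) c)
      (PySem.Dict.empty : PySem.Dict Int Int)
  let clashes :=
    (PySem.Dict.items d).foldl (fun clashes p =>
      p.2.foldl (fun clashes v =>
        let m := PySem.Dict.getD keysWith v 0 - 1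
        if 0 < m then
          PySem.Dict.modify clashes v [] (fun xs => xs ++ List.replicate m.toNat p.1)
        else clashes) clashes) (PySem.Dict.empty : PySem.Dict Int (List Int))
  PySem.Dict.items clashes

-- ===== PRECONDITION & SPEC =====
def Spec_getclashes (cluedict : List (Int × List Int)) (out : List (Int × List Int)) : Prop := out = getclashes_alt cluedict
instance (cluedict : List (Int × List Int)) (out : List (Int × List Int)) : Decidable (Spec_getclashes cluedict out) := by unfold Spec_getclashes; infer_instance

-- ===== CLAIM (what is proved, stated in full; the proofs are below) =====
def Claim_equal_getclashes : Prop := ∀ (cluedict : List (Int × List Int)), Dom_getclashes cluedict → Spec_getclashes cluedict (getclashes cluedict)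

-- ===== LEMMAS AND PROOFS =====

-- appending a to d[v], then b, is appending a ++ b
theorem pv_modify_modify_append (c : PySem.Dict Int (List Int)) (v : Int) (a b : List Int) :
    PySem.Dict.modify (PySem.Dict.modify c v [] (fun xs => xs ++ a)) v [] (fun xs => xs ++ b)
      = PySem.Dict.modify c v [] (fun xs => xs ++ (a ++ b)) := by
  simp [PySem.Dict.modify, PySem.Dict.getD_insert_self, PySem.Dict.insert_insert_self,
        List.append_assoc]

-- A's insert/append branch pair is exactly one modify-append
theorem pv_branch_eq_modify (c : PySem.Dict Int (List Int)) (v k : Int) :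
    (if ¬ (PySem.Dict.contains c v = true) then PySem.Dict.insert c v [k]
     else PySem.Dict.modify c v [] (fun xs => xs ++ [k]))
      = PySem.Dict.modify c v [] (fun xs => xs ++ [k]) := by
  by_cases h : PySem.Dict.contains c v = true
  · simp [h]
  · simp [h, PySem.Dict.modify,
      PySem.Dict.getD_of_not_contains c ([] : List Int) (by simpa using h)]

-- "append n copies" accumulator
def pvAddN (c : PySem.Dict Int (List Int)) (v k : Int) (n : Nat) : PySem.Dict Int (List Int) :=
  if n = 0 then c else PySem.Dict.modify c v [] (fun xs => xs ++ List.replicate n k)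

theorem pv_inner_fold (p : Int → Prop) [DecidablePred p] (v k : Int) :
    ∀ (ls : List Int) (c : PySem.Dict Int (List Int)),
      ls.foldl (fun c l => if p l then PySem.Dict.modify c v [] (fun xs => xs ++ [k]) else c) c
        = pvAddN c v k (ls.countP (fun l => decide (p l))) := by
  intro ls
  induction ls with
  | nil => intro c; simp [pvAddN]
  | cons a ls ih =>
    intro c
    by_cases h : p a
    · simp only [List.foldl_cons, List.countP_cons, h, if_pos, decide_true]
      rw [ih]
      rcases Nat.eq_zero_or_pos (ls.countP (fun l => decide (p l))) with h0 | h0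
      · simp [pvAddN, h0]
      · have hne : ls.countP (fun l => decide (p l)) ≠ 0 := Nat.pos_iff_ne_zero.mp h0
        simp only [pvAddN, if_neg hne, if_neg (by omega : ¬ ls.countP (fun l => decide (p l)) + 1 = 0)]
        rw [pv_modify_modify_append]
        simp [List.replicate_succ]
    · simp only [List.foldl_cons, List.countP_cons, h, decide_false]
      simpa using ih c

-- dropping the one occurrence of k from a Nodup list lowers the count by one
theorem pv_countP_ne (k : Int) (Q : Int → Bool) :
    ∀ (ls : List Int), ls.Nodup → k ∈ ls → Q k = true →
      ls.countP (fun l => !(l == k) && Q l) + 1 = ls.countP Q := by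
  intro ls
  induction ls with
  | nil => intro _ h; simp at h
  | cons a ls ih =>
    intro hnd hm hQ
    rcases List.nodup_cons.mp hnd with ⟨hna, hnd'⟩
    by_cases ha : a = k
    · have hcnt : ls.countP (fun l => !(l == k) && Q l) = ls.countP Q := by
        apply List.countP_congr
        intro x hx
        have hxk : x ≠ k := fun hh => hna (by rw [ha, ← hh]; exact hx)
        simp [hxk]
      rw [List.countP_cons, List.countP_cons, hcnt]
      simp [ha, hQ]
    · have hm' : k ∈ ls := by
        rcases hm with _ | hm
        · exact absurd rfl ha
        · assumption
      have := ih hnd' hm' hQ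
      simp only [List.countP_cons]
      have hak : (a == k) = false := by simp [ha]
      by_cases hQa : Q a = true
      · simp [hak, hQa]; omega
      · simp [hak, Bool.eq_false_iff.mpr hQa] at *; omega

-- the counter dict: d[v] = number of lists (among valss) containing v
theorem pv_counter_getD (v : Int) :
    ∀ (valss : List (List Int)) (c : PySem.Dict Int Int),
      PySem.Dict.getD
        (valss.foldl (fun c vals =>
          (PySem.Set.ofList vals).foldl (fun c w => PySem.Dict.modify c w 0 (fun n => n + 1)) c) c)
        v 0
      = PySem.Dict.getD c v 0 + (valss.countP (fun vals => decide (v ∈ vals)) : Int) := by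
  intro valss
  induction valss with
  | nil => intro c; simp
  | cons vals valss ih =>
    intro c
    simp only [List.foldl_cons, List.countP_cons]
    rw [ih, PySem.Dict.getD_foldl_modify_add_one]
    have hcnt : (PySem.Set.ofList vals).count v = if v ∈ vals then 1 else 0 := by
      by_cases hv : v ∈ vals
      · simp [hv, List.count_eq_one_of_mem (PySem.Set.nodup_ofList vals)
          ((PySem.Set.mem_ofList vals v).mpr hv)]
      · simp [hv, List.count_eq_zero.mpr (fun h => hv ((PySem.Set.mem_ofList vals v).mp h))]
    by_cases hv : v ∈ vals <;> simp [hcnt, hv] <;> push_cast <;> ring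

-- ===== VERDICT (by name: the statement is the Claim_ definition above) =====
theorem getclashes_spec : Claim_equal_getclashes := by
  intro cluedict _
  unfold Spec_getclashes getclashes getclashes_alt
  simp only []
  set d := PySem.Dict.ofList cluedict with hd
  have hnd : (PySem.Dict.keys d).Nodup := PySem.Dict.nodup_keys_ofList cluedict
  set ks := PySem.Dict.keys d with hks
  -- rewrite B's fold over items as a fold over keys
  rw [PySem.Dict.items_eq_map_keys d hnd [], List.foldl_map]
  congr 1
  -- and B's values likewise
  rw [PySem.Dict.values_eq_map_keys d hnd []]
  -- outer loop: agree for every key k ∈ ks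
  apply PySem.List.foldl_congr_mem
  intro c k hk
  -- inner loop over the values of k: agree for every element v
  apply PySem.List.foldl_congr_mem
  intro c v hv
  -- A's innermost scan collapses to one modify with a count
  simp only [pv_branch_eq_modify]
  rw [pv_inner_fold (fun l => l ≠ k ∧ v ∈ PySem.Dict.getD d l []) v k ks c]
  -- B's count lookup
  rw [pv_counter_getD v]
  have hQ : (fun l => decide (v ∈ PySem.Dict.getD d l [])) k = true := by
    simpa using hv
  have hcnt := pv_countP_ne k (fun l => decide (v ∈ PySem.Dict.getD d l [])) ks hnd hk hQ
  have hpred : ks.countP (fun l => decide (l ≠ k ∧ v ∈ PySem.Dict.getD d l []))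
      = ks.countP (fun l => !(l == k) && decide (v ∈ PySem.Dict.getD d l [])) := by
    apply List.countP_congr
    intro x _
    by_cases hx : x = k <;> simp [hx]
  rw [hpred]
  simp only [List.countP_map, Function.comp_def, ← hks] at *
  set n := ks.countP (fun l => !(l == k) && decide (v ∈ PySem.Dict.getD d l [])) with hn
  have hm : PySem.Dict.getD (PySem.Dict.empty : PySem.Dict Int Int) v 0
      + (ks.countP (fun l => decide (v ∈ PySem.Dict.getD d l [])) : Int) - 1 = (n : Int) := by
    simp [PySem.Dict.getD_empty, ← hcnt]
  rw [hm]
  rcases Nat.eq_zero_or_pos n with h0 | h0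
  · simp [pvAddN, h0]
  · have : (0 : Int) < (n : Int) := by exact_mod_cast h0
    simp [pvAddN, Nat.pos_iff_ne_zero.mp h0, this]
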